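-- pv_equiv track=rewrite | github.com/pvtrov/algorithms-and-data-structures | exercises_from_course/to_exams_/2020_21/final_coll_2/zad1_rect.py | rect
-- ===== SOURCE A (Python) =====
-- def area_for_rec(x1, y1, x2, y2):
--     diff_x = x2 - x1
--     diff_y = y2 - y1
--
--     if diff_x < 0 or diff_y < 0:
--         return 0
--     else:
--         return diff_x * diff_y
--
-- def rect(D):
--     if len(D) <= 1:
--         return None
--     """tu prosze wpisac wlasna implementacje"""
--     max_x, max_y, min_x, min_y = [], [], [], []
--
--     for x1, y1, x2, y2 in D:
--         max_x.append(x1)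
--         max_y.append(y1)
--         min_x.append(x2)
--         min_y.append(y2)
--
--         # sortowanie działa w czasie O(1), bo listy zawieraja maks. 3 elementy
--         max_x, max_y, min_x, min_y = [
--             sorted(max_x), sorted(max_y),
--             sorted(min_x), sorted(min_y)
--         ]
--
--         # wyrzucamy max 1 element
--         max_x = max_x[-2:]
--         max_y = max_y[-2:]
--
--         min_x = min_x[:2]
--         min_y = min_y[:2]
--
--     best = (0, 0)
--     for i in range(len(D)):
--         x1, y1, x2, y2 = D[i]
--
--         cur_max_x = (max_x[0] if max_x[1] == x1 else max_x[1])
--         cur_max_y = (max_y[0] if max_y[1] == y1 else max_y[1])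
--
--         cur_min_x = (min_x[1] if min_x[0] == x2 else min_x[0])
--         cur_min_y = (min_y[1] if min_y[0] == y2 else min_y[0])
--
--         best = max(best, (area_for_rec(cur_max_x, cur_max_y, cur_min_x, cur_min_y), -i))
--
--     return -best[1]
-- ===== SOURCE B (Python) =====
-- def area_for_rec(x1, y1, x2, y2):
--     diff_x = x2 - x1
--     diff_y = y2 - y1
--
--     if diff_x < 0 or diff_y < 0:
--         return 0
--     else:
--         return diff_x * diff_y
--
-- def rect(D):
--     if len(D) <= 1:
--         return None
--     best_area, best_i = 0, 0
--     for i in range(len(D)):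
--         others = D[:i] + D[i + 1:]
--         x1 = max(r[0] for r in others)
--         y1 = max(r[1] for r in others)
--         x2 = min(r[2] for r in others)
--         y2 = min(r[3] for r in others)
--         area = area_for_rec(x1, y1, x2, y2)
--         if area > best_area:
--             best_area, best_i = area, i
--     return best_i
-- ===== Notes on version B (the rewrite author's own statement) =====
-- stated objective: simpler
-- what changed: Replaced A's incremental top-2/bottom-2 extrema maintenance plus value-based exclusion lookup with a direct per-index recompute of the intersection over all other rectangles, keeping the best area with a strict-improvement scan (smallest index on ties).
import Mathlib
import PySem

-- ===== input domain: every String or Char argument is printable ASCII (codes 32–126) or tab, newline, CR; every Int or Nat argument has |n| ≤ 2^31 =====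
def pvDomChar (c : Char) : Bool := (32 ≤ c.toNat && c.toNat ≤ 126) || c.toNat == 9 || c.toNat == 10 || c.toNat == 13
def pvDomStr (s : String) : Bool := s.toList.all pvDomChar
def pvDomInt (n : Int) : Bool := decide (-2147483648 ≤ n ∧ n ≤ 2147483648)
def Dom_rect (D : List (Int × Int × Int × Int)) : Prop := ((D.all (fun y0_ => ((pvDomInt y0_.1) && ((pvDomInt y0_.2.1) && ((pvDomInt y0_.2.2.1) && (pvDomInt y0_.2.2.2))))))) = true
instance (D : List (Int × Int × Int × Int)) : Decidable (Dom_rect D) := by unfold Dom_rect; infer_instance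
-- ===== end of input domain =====

-- B replaces A's incremental top-2/bottom-2 extrema bookkeeping with a simpler direct
-- per-index recompute of the intersection over the other rectangles (simpler, not faster).

-- ===== PORT A =====
-- helper area_for_rec (shared by both Python files)
def areaForRec (x1 y1 x2 y2 : Int) : Int :=
  let diffX := x2 - x1
  let diffY := y2 - y1
  if diffX < 0 ∨ diffY < 0 then 0 else diffX * diffY

-- one step of A's loop on one of the 'max' lists: append, sort, keep the last two
def stepMax (l : List Int) (v : Int) : List Int :=
  PySem.List.slice (PySem.List.sorted (l ++ [v]) (fun x => x) false) (some (-2)) none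

-- one step of A's loop on one of the 'min' lists: append, sort, keep the first two
def stepMin (l : List Int) (v : Int) : List Int :=
  PySem.List.slice (PySem.List.sorted (l ++ [v]) (fun x => x) false) none (some 2)

-- Python max(p, t) on int pairs: first argument on ties, lexicographic order
def pairMax (p t : Int × Int) : Int × Int :=
  if t.1 < p.1 ∨ (t.1 = p.1 ∧ t.2 ≤ p.2) then p else t

def rect (D : List (Int × Int × Int × Int)) : Option Int :=
  if D.length ≤ 1 then none
  else
    let st := D.foldl (fun st r =>
      (stepMax st.1 r.1, stepMax st.2.1 r.2.1, stepMin st.2.2.1 r.2.2.1, stepMin st.2.2.2 r.2.2.2))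
      ([], [], [], [])
    let best := (PySem.List.pyRange 0 (D.length : Int) 1).foldl (fun best i =>
      -- D[i], max_x[0], max_x[1], … : every index is in range here, so pyGetD is exact
      let r := PySem.List.pyGetD D i (0, 0, 0, 0)
      let curMaxX := if PySem.List.pyGetD st.1 1 0 == r.1 then PySem.List.pyGetD st.1 0 0 else PySem.List.pyGetD st.1 1 0
      let curMaxY := if PySem.List.pyGetD st.2.1 1 0 == r.2.1 then PySem.List.pyGetD st.2.1 0 0 else PySem.List.pyGetD st.2.1 1 0
      let curMinX := if PySem.List.pyGetD st.2.2.1 0 0 == r.2.2.1 then PySem.List.pyGetD st.2.2.1 1 0 else PySem.List.pyGetD st.2.2.1 0 0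
      let curMinY := if PySem.List.pyGetD st.2.2.2 0 0 == r.2.2.2 then PySem.List.pyGetD st.2.2.2 1 0 else PySem.List.pyGetD st.2.2.2 0 0
      pairMax best (areaForRec curMaxX curMaxY curMinX curMinY, -i)) (0, 0)
    some (-best.2)

-- ===== PORT B =====
def rect_alt (D : List (Int × Int × Int × Int)) : Option Int :=
  if D.length ≤ 1 then none
  else
    let best := (PySem.List.pyRange 0 (D.length : Int) 1).foldl (fun acc i =>
      let others := PySem.List.slice D none (some i) ++ PySem.List.slice D (some (i + 1)) none
      -- others is nonempty (len ≥ 2), so Python's max/min never raise; getD 0 is unreachable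
      let x1 := (PySem.List.max? (others.map (fun r => r.1)) (fun v => v)).getD 0
      let y1 := (PySem.List.max? (others.map (fun r => r.2.1)) (fun v => v)).getD 0
      let x2 := (PySem.List.min? (others.map (fun r => r.2.2.1)) (fun v => v)).getD 0
      let y2 := (PySem.List.min? (others.map (fun r => r.2.2.2)) (fun v => v)).getD 0
      let area := areaForRec x1 y1 x2 y2
      if area > acc.1 then (area, i) else acc) (0, 0)
    some best.2

-- ===== PRECONDITION & SPEC =====
def Spec_rect (D : List (Int × Int × Int × Int)) (out : Option Int) : Prop := out = rect_alt D
instance (D : List (Int × Int × Int × Int)) (out : Option Int) : Decidable (Spec_rect D out) := by unfold Spec_rect; infer_instance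

-- ===== CLAIM (what is proved, stated in full; the proofs are below) =====
def Claim_equal_rect : Prop := ∀ (D : List (Int × Int × Int × Int)), Dom_rect D → Spec_rect D (rect D)

-- ===== LEMMAS AND PROOFS =====

-- max of a nonempty list as B's running fold (0 for [] is unreachable)
def listMax : List Int → Int
  | [] => 0
  | x :: t => t.foldl max x

def listMin : List Int → Int
  | [] => 0
  | x :: t => t.foldl min x

theorem listMax_eq (l : List Int) (m : Int) (hm : m ∈ l) (hb : ∀ y ∈ l, y ≤ m) : listMax l = m := by
  match l with
  | [] => simp at hm
  | x :: t =>
    have h1 := PySem.List.le_foldl_max t x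
    have h2 := PySem.List.foldl_max_mem t x
    simp only [listMax]
    apply le_antisymm
    · rcases h2 with h | h
      · rw [h]; exact hb x (by simp)
      · exact hb _ (by simp [h])
    · rcases List.mem_cons.mp hm with rfl | h
      · exact h1.1
      · exact h1.2 _ h

theorem listMin_eq (l : List Int) (m : Int) (hm : m ∈ l) (hb : ∀ y ∈ l, m ≤ y) : listMin l = m := by
  match l with
  | [] => simp at hm
  | x :: t =>
    have h1 := PySem.List.foldl_min_le t x
    have h2 := PySem.List.foldl_min_mem t x
    simp only [listMin]
    apply le_antisymm
    · rcases List.mem_cons.mp hm with rfl | h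
      · exact h1.1
      · exact h1.2 _ h
    · rcases h2 with h | h
      · rw [h]; exact hb x (by simp)
      · exact hb _ (by simp [h])

theorem perm_cons_eraseIdx (α : Type) (xs : List α) (k : Nat) (h : k < xs.length) :
    xs.Perm (xs[k] :: xs.eraseIdx k) := by
  rw [List.eraseIdx_eq_take_drop_succ]
  have : xs = xs.take k ++ xs[k] :: xs.drop (k+1) := by
    rw [List.getElem_cons_drop]; simp
  conv_lhs => rw [this]
  exact List.perm_middle

-- A's value-based exclusion over the sorted top-2 pair equals the max over the others
theorem curmax_eq (xs ys : List Int) (a b : Int) (hp : (a :: b :: ys).Perm xs) (hab : a ≤ b)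
    (hys : ∀ y ∈ ys, y ≤ a) (k : Nat) (h : k < xs.length) :
    (if b == xs[k] then a else b) = listMax (xs.eraseIdx k) := by
  have hmem : ∀ y ∈ xs, y ≤ b := by
    intro y hy
    rcases List.mem_cons.mp (hp.mem_iff.mpr hy) with rfl | hy2
    · exact hab
    rcases List.mem_cons.mp hy2 with rfl | hy3
    · exact le_refl _
    · exact le_trans (hys _ hy3) hab
  have hpe := perm_cons_eraseIdx Int xs k h
  by_cases hv : b = xs[k]
  · simp only [hv, beq_self_eq_true, if_true]
    have h1 : (xs[k] :: a :: ys).Perm (xs[k] :: xs.eraseIdx k) :=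
      ((List.Perm.swap a xs[k] ys).trans (hv ▸ hp)).trans hpe
    have h2 := h1.cons_inv
    refine (listMax_eq _ a (h2.mem_iff.mp (by simp)) ?_).symm
    intro y hy
    rcases List.mem_cons.mp (h2.mem_iff.mpr hy) with rfl | hy2
    · exact le_refl _
    · exact hys _ hy2
  · simp only [beq_iff_eq, hv, if_false]
    refine (listMax_eq _ b ?_ ?_).symm
    · have hbx : b ∈ xs := hp.mem_iff.mp (by simp)
      rcases List.mem_cons.mp (hpe.mem_iff.mp hbx) with h' | h'
      · exact absurd h' hv
      · exact h'
    · intro y hy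
      exact hmem y (hpe.mem_iff.mpr (by simp [hy]))

theorem curmin_eq (xs ys : List Int) (a b : Int) (hp : (a :: b :: ys).Perm xs) (hab : a ≤ b)
    (hys : ∀ y ∈ ys, b ≤ y) (k : Nat) (h : k < xs.length) :
    (if a == xs[k] then b else a) = listMin (xs.eraseIdx k) := by
  have hmem : ∀ y ∈ xs, a ≤ y := by
    intro y hy
    rcases List.mem_cons.mp (hp.mem_iff.mpr hy) with rfl | hy2
    · exact le_refl _
    rcases List.mem_cons.mp hy2 with rfl | hy3
    · exact hab
    · exact le_trans hab (hys _ hy3)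
  have hpe := perm_cons_eraseIdx Int xs k h
  by_cases hv : a = xs[k]
  · simp only [hv, beq_self_eq_true, if_true]
    have h1 : (xs[k] :: b :: ys).Perm (xs[k] :: xs.eraseIdx k) := (hv ▸ hp).trans hpe
    have h2 := h1.cons_inv
    refine (listMin_eq _ b (h2.mem_iff.mp (by simp)) ?_).symm
    intro y hy
    rcases List.mem_cons.mp (h2.mem_iff.mpr hy) with rfl | hy2
    · exact le_refl _
    · exact hys _ hy2
  · simp only [beq_iff_eq, hv, if_false]
    refine (listMin_eq _ a ?_ ?_).symm
    · have hax : a ∈ xs := hp.mem_iff.mp (by simp)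
      rcases List.mem_cons.mp (hpe.mem_iff.mp hax) with h' | h'
      · exact absurd h' hv
      · exact h'
    · intro y hy
      exact hmem y (hpe.mem_iff.mpr (by simp [hy]))

theorem stepMax_nil (x : Int) : stepMax [] x = [x] := rfl

theorem stepMin_nil (x : Int) : stepMin [] x = [x] := rfl

theorem sort2 (p x : Int) :
    PySem.List.sorted [p, x] (fun y => y) false = if x < p then [x, p] else [p, x] := by
  split_ifs with h
  · exact PySem.List.sorted_id_eq_of_perm_of_pairwise _ _ (List.Perm.swap p x [])
      (by simp [List.pairwise_cons]; omega)
  · exact PySem.List.sorted_id_eq_of_perm_of_pairwise _ _ (List.Perm.refl _)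
      (by simp [List.pairwise_cons]; omega)

theorem sort3 (a b x : Int) (h : a ≤ b) : PySem.List.sorted [a, b, x] (fun y => y) false =
    if b ≤ x then [a, b, x] else if a ≤ x then [a, x, b] else [x, a, b] := by
  split_ifs with h1 h2
  · exact PySem.List.sorted_id_eq_of_perm_of_pairwise _ _ (List.Perm.refl _)
      (by simp [List.pairwise_cons]; omega)
  · exact PySem.List.sorted_id_eq_of_perm_of_pairwise _ _
      (List.Perm.cons a (List.Perm.swap b x [])) (by simp [List.pairwise_cons]; omega)
  · refine PySem.List.sorted_id_eq_of_perm_of_pairwise _ _ ?_ (by simp [List.pairwise_cons]; omega)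
    exact (List.Perm.swap a x [b]).trans (List.Perm.cons a (List.Perm.swap b x []))

theorem stepMax_single (p x : Int) : stepMax [p] x = if x < p then [x, p] else [p, x] := by
  unfold stepMax
  rw [show ([p] ++ [x]) = [p, x] from rfl, sort2]
  split_ifs <;> rw [PySem.List.slice_from_neg_ofNat _ 2 (by omega)] <;> rfl

theorem stepMax_pair (a b x : Int) (h : a ≤ b) :
    stepMax [a, b] x = if b ≤ x then [b, x] else if a ≤ x then [x, b] else [a, b] := by
  unfold stepMax
  rw [show ([a, b] ++ [x]) = [a, b, x] from rfl, sort3 a b x h]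
  split_ifs <;> rw [PySem.List.slice_from_neg_ofNat _ 2 (by omega)] <;> rfl

theorem stepMin_single (p x : Int) : stepMin [p] x = if x < p then [x, p] else [p, x] := by
  unfold stepMin
  rw [show ([p] ++ [x]) = [p, x] from rfl, sort2]
  split_ifs <;> rw [PySem.List.slice_to _ (by omega : (0:Int) ≤ 2)] <;> rfl

theorem stepMin_pair (a b x : Int) (h : a ≤ b) :
    stepMin [a, b] x = if x < a then [x, a] else if x < b then [a, x] else [a, b] := by
  unfold stepMin
  rw [show ([a, b] ++ [x]) = [a, b, x] from rfl, sort3 a b x h]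
  have e : ∀ l : List Int, PySem.List.slice l none (some 2) = l.take 2 :=
    fun l => PySem.List.slice_to l (by omega)
  split_ifs <;> simp_all <;> omega

theorem foldMax_inv (tail : List Int) : ∀ (a b : Int) (ys : List Int), a ≤ b → (∀ y ∈ ys, y ≤ a) →
    ∃ a' b' ys', tail.foldl stepMax [a, b] = [a', b'] ∧ a' ≤ b' ∧ (∀ y ∈ ys', y ≤ a') ∧
      (a' :: b' :: ys').Perm (a :: b :: ys ++ tail) := by
  induction tail with
  | nil => exact fun a b ys hab hys => ⟨a, b, ys, rfl, hab, hys, by simp⟩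
  | cons x t ih =>
    intro a b ys hab hys
    simp only [List.foldl_cons]
    rw [stepMax_pair a b x hab]
    split_ifs with h1 h2
    · obtain ⟨a', b', ys', he, hab', hys', hp⟩ := ih b x (a :: ys) h1
        (fun y hy => by rcases List.mem_cons.mp hy with rfl | hy2
                        · exact hab
                        · exact le_trans (hys _ hy2) hab)
      refine ⟨a', b', ys', he, hab', hys', hp.trans ?_⟩
      rw [List.perm_iff_count]; intro v
      simp [List.count_cons, List.count_append]
      split_ifs <;> omega
    · obtain ⟨a', b', ys', he, hab', hys', hp⟩ := ih x b (a :: ys) (le_of_lt (not_le.mp h1))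
        (fun y hy => by rcases List.mem_cons.mp hy with rfl | hy2
                        · exact h2
                        · exact le_trans (hys _ hy2) h2)
      refine ⟨a', b', ys', he, hab', hys', hp.trans ?_⟩
      rw [List.perm_iff_count]; intro v
      simp [List.count_cons, List.count_append]
      split_ifs <;> omega
    · obtain ⟨a', b', ys', he, hab', hys', hp⟩ := ih a b (x :: ys) hab
        (fun y hy => by rcases List.mem_cons.mp hy with rfl | hy2
                        · exact le_of_lt (not_le.mp h2)
                        · exact hys _ hy2)
      refine ⟨a', b', ys', he, hab', hys', hp.trans ?_⟩
      rw [List.perm_iff_count]; intro v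
      simp [List.count_cons, List.count_append]
      split_ifs <;> omega

theorem foldMin_inv (tail : List Int) : ∀ (a b : Int) (ys : List Int), a ≤ b → (∀ y ∈ ys, b ≤ y) →
    ∃ a' b' ys', tail.foldl stepMin [a, b] = [a', b'] ∧ a' ≤ b' ∧ (∀ y ∈ ys', b' ≤ y) ∧
      (a' :: b' :: ys').Perm (a :: b :: ys ++ tail) := by
  induction tail with
  | nil => exact fun a b ys hab hys => ⟨a, b, ys, rfl, hab, hys, by simp⟩
  | cons x t ih =>
    intro a b ys hab hys
    simp only [List.foldl_cons]
    rw [stepMin_pair a b x hab]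
    split_ifs with h1 h2
    · obtain ⟨a', b', ys', he, hab', hys', hp⟩ := ih x a (b :: ys) (le_of_lt h1)
        (fun y hy => by rcases List.mem_cons.mp hy with rfl | hy2
                        · exact hab
                        · exact le_trans hab (hys _ hy2))
      refine ⟨a', b', ys', he, hab', hys', hp.trans ?_⟩
      rw [List.perm_iff_count]; intro v
      simp [List.count_cons, List.count_append]
      split_ifs <;> omega
    · obtain ⟨a', b', ys', he, hab', hys', hp⟩ := ih a x (b :: ys) (not_lt.mp h1)
        (fun y hy => by rcases List.mem_cons.mp hy with rfl | hy2
                        · exact le_of_lt h2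
                        · exact le_trans (le_of_lt h2) (hys _ hy2))
      refine ⟨a', b', ys', he, hab', hys', hp.trans ?_⟩
      rw [List.perm_iff_count]; intro v
      simp [List.count_cons, List.count_append]
      split_ifs <;> omega
    · obtain ⟨a', b', ys', he, hab', hys', hp⟩ := ih a b (x :: ys) hab
        (fun y hy => by rcases List.mem_cons.mp hy with rfl | hy2
                        · exact not_lt.mp h2
                        · exact hys _ hy2)
      refine ⟨a', b', ys', he, hab', hys', hp.trans ?_⟩
      rw [List.perm_iff_count]; intro v
      simp [List.count_cons, List.count_append]
      split_ifs <;> omega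

theorem foldMax_spec (x0 x1 : Int) (tl : List Int) :
    ∃ a b ys, (x0 :: x1 :: tl).foldl stepMax [] = [a, b] ∧ a ≤ b ∧ (∀ y ∈ ys, y ≤ a) ∧
      (a :: b :: ys).Perm (x0 :: x1 :: tl) := by
  simp only [List.foldl_cons, stepMax_nil, stepMax_single]
  split_ifs with h
  · obtain ⟨a, b, ys, he, hab, hys, hp⟩ := foldMax_inv tl x1 x0 [] (le_of_lt h) (by simp)
    have hp2 : (a :: b :: ys).Perm (x1 :: x0 :: tl) := by simpa using hp
    exact ⟨a, b, ys, he, hab, hys, hp2.trans (List.Perm.swap x0 x1 tl)⟩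
  · obtain ⟨a, b, ys, he, hab, hys, hp⟩ := foldMax_inv tl x0 x1 [] (not_lt.mp h) (by simp)
    exact ⟨a, b, ys, he, hab, hys, by simpa using hp⟩

theorem foldMin_spec (x0 x1 : Int) (tl : List Int) :
    ∃ a b ys, (x0 :: x1 :: tl).foldl stepMin [] = [a, b] ∧ a ≤ b ∧ (∀ y ∈ ys, b ≤ y) ∧
      (a :: b :: ys).Perm (x0 :: x1 :: tl) := by
  simp only [List.foldl_cons, stepMin_nil, stepMin_single]
  split_ifs with h
  · obtain ⟨a, b, ys, he, hab, hys, hp⟩ := foldMin_inv tl x1 x0 [] (le_of_lt h) (by simp)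
    have hp2 : (a :: b :: ys).Perm (x1 :: x0 :: tl) := by simpa using hp
    exact ⟨a, b, ys, he, hab, hys, hp2.trans (List.Perm.swap x0 x1 tl)⟩
  · obtain ⟨a, b, ys, he, hab, hys, hp⟩ := foldMin_inv tl x0 x1 [] (not_lt.mp h) (by simp)
    exact ⟨a, b, ys, he, hab, hys, by simpa using hp⟩

theorem fold4_eq (D : List (Int × Int × Int × Int)) : ∀ (s1 s2 s3 s4 : List Int),
    D.foldl (fun st r =>
      (stepMax st.1 r.1, stepMax st.2.1 r.2.1, stepMin st.2.2.1 r.2.2.1, stepMin st.2.2.2 r.2.2.2))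
      (s1, s2, s3, s4)
    = ((D.map (fun r => r.1)).foldl stepMax s1, (D.map (fun r => r.2.1)).foldl stepMax s2,
       (D.map (fun r => r.2.2.1)).foldl stepMin s3, (D.map (fun r => r.2.2.2)).foldl stepMin s4) := by
  induction D with
  | nil => intro s1 s2 s3 s4; rfl
  | cons r t ih =>
    intro s1 s2 s3 s4
    simp only [List.foldl_cons, List.map_cons]
    exact ih _ _ _ _

theorem bestRel (f : Int → Int) (is : List Int) : ∀ (b j : Int), (∀ k ∈ is, j ≤ k) →
    is.Pairwise (· < ·) →
    is.foldl (fun p i => pairMax p (f i, -i)) (b, -j)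
      = ((is.foldl (fun q i => if f i > q.1 then (f i, i) else q) (b, j)).1,
         -(is.foldl (fun q i => if f i > q.1 then (f i, i) else q) (b, j)).2) := by
  induction is with
  | nil => intro b j _ _; rfl
  | cons i t ih =>
    intro b j hj hpw
    have hji : j ≤ i := hj i (by simp)
    have hpw' := (List.pairwise_cons.mp hpw).2
    have hlt := (List.pairwise_cons.mp hpw).1
    simp only [List.foldl_cons]
    by_cases hgt : f i > b
    · have hA : pairMax (b, -j) (f i, -i) = (f i, -i) := by
        unfold pairMax; rw [if_neg]; intro hc; rcases hc with h | ⟨h1, h2⟩ <;> omega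
      rw [hA, if_pos hgt]
      exact ih (f i) i (fun k hk => le_of_lt (hlt k hk)) hpw'
    · have hA : pairMax (b, -j) (f i, -i) = (b, -j) := by
        unfold pairMax; rw [if_pos]; simp only []
        rcases lt_or_eq_of_le (not_lt.mp hgt) with h | h
        · left; exact h
        · right; exact ⟨h, by omega⟩
      rw [hA, if_neg hgt]
      exact ih b j (fun k hk => le_trans hji (le_of_lt (hlt k hk))) hpw'

theorem maxD_ne_nil (l : List Int) (h : l ≠ []) :
    (PySem.List.max? l (fun v => v)).getD 0 = listMax l := by
  obtain ⟨z, zs, hz⟩ := List.exists_cons_of_ne_nil h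
  rw [hz, PySem.List.max?_id_cons]; rfl

theorem minD_ne_nil (l : List Int) (h : l ≠ []) :
    (PySem.List.min? l (fun v => v)).getD 0 = listMin l := by
  obtain ⟨z, zs, hz⟩ := List.exists_cons_of_ne_nil h
  rw [hz, PySem.List.min?_id_cons]; rfl

-- B's "others" list is D with index i removed
theorem others_eq (D : List (Int × Int × Int × Int)) (i : Int) (h0 : 0 ≤ i) :
    PySem.List.slice D none (some i) ++ PySem.List.slice D (some (i + 1)) none
      = D.eraseIdx i.toNat := by
  rw [PySem.List.slice_to D h0, PySem.List.slice_from D (by omega)]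
  rw [show (i + 1).toNat = i.toNat + 1 by omega]
  exact (List.eraseIdx_eq_take_drop_succ _ _).symm

-- ===== VERDICT (by name: the statement is the Claim_ definition above) =====
set_option maxHeartbeats 2000000 in
theorem rect_spec : Claim_equal_rect := by
  intro D _
  unfold Spec_rect rect rect_alt
  by_cases hlen : D.length ≤ 1
  · simp [hlen]
  · rcases D with _ | ⟨d0, _ | ⟨d1, tl⟩⟩
    · simp at hlen
    · simp at hlen
    · clear hlen
      have hDlen : ¬ (d0 :: d1 :: tl).length ≤ 1 := by simp
      simp only [if_neg hDlen]
      rw [fold4_eq]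
      obtain ⟨a1, b1, ys1, he1, hab1, hys1, hp1⟩ := foldMax_spec d0.1 d1.1 (tl.map (fun r => r.1))
      obtain ⟨a2, b2, ys2, he2, hab2, hys2, hp2⟩ := foldMax_spec d0.2.1 d1.2.1 (tl.map (fun r => r.2.1))
      obtain ⟨a3, b3, ys3, he3, hab3, hys3, hp3⟩ := foldMin_spec d0.2.2.1 d1.2.2.1 (tl.map (fun r => r.2.2.1))
      obtain ⟨a4, b4, ys4, he4, hab4, hys4, hp4⟩ := foldMin_spec d0.2.2.2 d1.2.2.2 (tl.map (fun r => r.2.2.2))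
      simp only [List.map_cons]
      rw [he1, he2, he3, he4]
      have hp1' : (a1 :: b1 :: ys1).Perm ((d0 :: d1 :: tl).map (fun r => r.1)) := hp1
      have hp2' : (a2 :: b2 :: ys2).Perm ((d0 :: d1 :: tl).map (fun r => r.2.1)) := hp2
      have hp3' : (a3 :: b3 :: ys3).Perm ((d0 :: d1 :: tl).map (fun r => r.2.2.1)) := hp3
      have hp4' : (a4 :: b4 :: ys4).Perm ((d0 :: d1 :: tl).map (fun r => r.2.2.2)) := hp4
      -- the common per-index area
      set g : Int → Int := fun i =>
        areaForRec (listMax (((d0 :: d1 :: tl).eraseIdx i.toNat).map (fun r => r.1)))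
                   (listMax (((d0 :: d1 :: tl).eraseIdx i.toNat).map (fun r => r.2.1)))
                   (listMin (((d0 :: d1 :: tl).eraseIdx i.toNat).map (fun r => r.2.2.1)))
                   (listMin (((d0 :: d1 :: tl).eraseIdx i.toNat).map (fun r => r.2.2.2))) with hg
      have hbound : ∀ i ∈ PySem.List.pyRange 0 ((d0 :: d1 :: tl).length : Int) 1,
          0 ≤ i ∧ i.toNat < (d0 :: d1 :: tl).length := by
        intro i hi
        have := PySem.List.mem_pyRange_one.mp hi
        omega
      -- A's loop body in terms of g
      have hA : (PySem.List.pyRange 0 ((d0 :: d1 :: tl).length : Int) 1).foldl (fun best i =>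
          let r := PySem.List.pyGetD (d0 :: d1 :: tl) i (0, 0, 0, 0)
          let curMaxX := if PySem.List.pyGetD [a1, b1] 1 0 == r.1 then PySem.List.pyGetD [a1, b1] 0 0 else PySem.List.pyGetD [a1, b1] 1 0
          let curMaxY := if PySem.List.pyGetD [a2, b2] 1 0 == r.2.1 then PySem.List.pyGetD [a2, b2] 0 0 else PySem.List.pyGetD [a2, b2] 1 0
          let curMinX := if PySem.List.pyGetD [a3, b3] 0 0 == r.2.2.1 then PySem.List.pyGetD [a3, b3] 1 0 else PySem.List.pyGetD [a3, b3] 0 0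
          let curMinY := if PySem.List.pyGetD [a4, b4] 0 0 == r.2.2.2 then PySem.List.pyGetD [a4, b4] 1 0 else PySem.List.pyGetD [a4, b4] 0 0
          pairMax best (areaForRec curMaxX curMaxY curMinX curMinY, -i)) (0, 0)
          = (PySem.List.pyRange 0 ((d0 :: d1 :: tl).length : Int) 1).foldl
              (fun p i => pairMax p (g i, -i)) (0, 0) := by
        apply PySem.List.foldl_congr_mem
        intro acc i hi
        obtain ⟨h0, h1⟩ := hbound i hi
        have hget : PySem.List.pyGetD (d0 :: d1 :: tl) i (0, 0, 0, 0) = (d0 :: d1 :: tl)[i.toNat] :=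
          PySem.List.pyGetD_eq_getElem (d0 :: d1 :: tl) _ h0 (by omega)
        simp only [hget]
        have e1 := curmax_eq _ ys1 a1 b1 hp1' hab1 hys1 i.toNat (by simpa using h1)
        have e2 := curmax_eq _ ys2 a2 b2 hp2' hab2 hys2 i.toNat (by simpa using h1)
        have e3 := curmin_eq _ ys3 a3 b3 hp3' hab3 hys3 i.toNat (by simpa using h1)
        have e4 := curmin_eq _ ys4 a4 b4 hp4' hab4 hys4 i.toNat (by simpa using h1)
        rw [List.getElem_map, List.eraseIdx_map] at e1 e2 e3 e4
        simp only [show PySem.List.pyGetD [a1, b1] 1 0 = b1 from rfl,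
          show PySem.List.pyGetD [a1, b1] 0 0 = a1 from rfl,
          show PySem.List.pyGetD [a2, b2] 1 0 = b2 from rfl,
          show PySem.List.pyGetD [a2, b2] 0 0 = a2 from rfl,
          show PySem.List.pyGetD [a3, b3] 1 0 = b3 from rfl,
          show PySem.List.pyGetD [a3, b3] 0 0 = a3 from rfl,
          show PySem.List.pyGetD [a4, b4] 1 0 = b4 from rfl,
          show PySem.List.pyGetD [a4, b4] 0 0 = a4 from rfl]
        rw [e1, e2, e3, e4, hg]
      -- B's loop body in terms of g
      have hB : (PySem.List.pyRange 0 ((d0 :: d1 :: tl).length : Int) 1).foldl (fun acc i =>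
          let others := PySem.List.slice (d0 :: d1 :: tl) none (some i) ++ PySem.List.slice (d0 :: d1 :: tl) (some (i + 1)) none
          let x1 := (PySem.List.max? (others.map (fun r => r.1)) (fun v => v)).getD 0
          let y1 := (PySem.List.max? (others.map (fun r => r.2.1)) (fun v => v)).getD 0
          let x2 := (PySem.List.min? (others.map (fun r => r.2.2.1)) (fun v => v)).getD 0
          let y2 := (PySem.List.min? (others.map (fun r => r.2.2.2)) (fun v => v)).getD 0
          let area := areaForRec x1 y1 x2 y2
          if area > acc.1 then (area, i) else acc) (0, 0)
          = (PySem.List.pyRange 0 ((d0 :: d1 :: tl).length : Int) 1).foldl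
              (fun q i => if g i > q.1 then (g i, i) else q) (0, 0) := by
        apply PySem.List.foldl_congr_mem
        intro acc i hi
        obtain ⟨h0, h1⟩ := hbound i hi
        have hne : (d0 :: d1 :: tl).eraseIdx i.toNat ≠ [] := by
          have : ((d0 :: d1 :: tl).eraseIdx i.toNat).length = (d0 :: d1 :: tl).length - 1 :=
            List.length_eraseIdx_of_lt h1
          intro hc; rw [hc] at this; simp at this
        simp only [others_eq (d0 :: d1 :: tl) i h0]
        rw [maxD_ne_nil _ (by simp [hne]), maxD_ne_nil _ (by simp [hne]),
          minD_ne_nil _ (by simp [hne]), minD_ne_nil _ (by simp [hne]), hg]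
      rw [hA, hB, show ((0 : Int), (0 : Int)) = ((0 : Int), -(0 : Int)) by norm_num]
      rw [bestRel g (PySem.List.pyRange 0 ((d0 :: d1 :: tl).length : Int) 1) 0 0
        (fun k hk => (hbound k hk).1) (PySem.List.pairwise_lt_pyRange_one 0 _)]
      simp
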